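-- pv_equiv track=rewrite | github.com/olsch88/DucksandDragons | quest13.py | construct_dial
-- ===== SOURCE A (Python) =====
-- def construct_dial(numbers: list[int])-> list[int]:
--     dials=[0]*(len(numbers)+1)
--     dials[0]=1
--     for i, num in enumerate(numbers):
--         if i%2==0:
--             dials[i//2+1]=num
--         else:
--             dials[-i//2]=num
--     return dials
-- ===== SOURCE B (Python) =====
-- def construct_dial(numbers: list[int]) -> list[int]:
--     front = [1]
--     back = []
--     take_front = True
--     for x in numbers:
--         if take_front:
--             front.append(x)
--         else:
--             back.append(x)
--         take_front = not take_front
--     back.reverse()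
--     return front + back
-- ===== Notes on version B (the rewrite author's own statement) =====
-- stated objective: simpler
-- what changed: Replaces the preallocated array filled by computed (including negative) placement indices with a one-pass partition into a front list and a back list via a boolean toggle, returning front + reversed(back).
import Mathlib
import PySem

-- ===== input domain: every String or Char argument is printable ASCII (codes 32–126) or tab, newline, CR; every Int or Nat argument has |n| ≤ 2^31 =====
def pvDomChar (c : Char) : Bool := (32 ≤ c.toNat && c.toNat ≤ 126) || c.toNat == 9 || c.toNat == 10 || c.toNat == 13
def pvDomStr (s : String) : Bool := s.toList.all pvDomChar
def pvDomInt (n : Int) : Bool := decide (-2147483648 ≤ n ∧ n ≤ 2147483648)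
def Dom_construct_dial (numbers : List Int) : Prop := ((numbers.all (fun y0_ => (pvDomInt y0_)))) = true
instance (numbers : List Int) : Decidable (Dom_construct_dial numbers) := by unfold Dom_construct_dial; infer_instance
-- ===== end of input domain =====

-- B replaces index-arithmetic placement into a preallocated array by a one-pass
-- partition into front/back lists with a boolean toggle (objective: simpler).

-- ===== PORT A =====
-- loop body of A's 'for i, num in enumerate(numbers)'
def stepA (dials : List Int) (p : Int × Int) : List Int :=
  if PySem.Int.mod p.1 2 == 0 then
    PySem.List.pySetD dials (PySem.Int.floordiv p.1 2 + 1) p.2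
  else
    PySem.List.pySetD dials (PySem.Int.floordiv (-p.1) 2) p.2

def construct_dial (numbers : List Int) : List Int :=
  let dials0 := List.replicate (numbers.length + 1) (0 : Int)
  let dials1 := PySem.List.pySetD dials0 0 1
  (PySem.List.enumerate numbers 0).foldl stepA dials1

-- ===== PORT B =====
-- loop body of B's 'for x in numbers' (state: front, back, take_front)
def stepB (s : List Int × List Int × Bool) (x : Int) : List Int × List Int × Bool :=
  if s.2.2 then (s.1 ++ [x], s.2.1, false) else (s.1, s.2.1 ++ [x], true)

def construct_dial_alt (numbers : List Int) : List Int :=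
  let s := numbers.foldl stepB ([1], [], true)
  s.1 ++ s.2.1.reverse

-- ===== PRECONDITION & SPEC =====
def Spec_construct_dial (numbers : List Int) (out : List Int) : Prop := out = construct_dial_alt numbers
instance (numbers : List Int) (out : List Int) : Decidable (Spec_construct_dial numbers out) := by unfold Spec_construct_dial; infer_instance

-- ===== CLAIM (what is proved, stated in full; the proofs are below) =====
def Claim_equal_construct_dial : Prop := ∀ (numbers : List Int), Dom_construct_dial numbers → Spec_construct_dial numbers (construct_dial numbers)

-- ===== LEMMAS AND PROOFS =====

-- proof-side helper: the even- and odd-position subsequences of a list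
def splitEO : List Int → List Int × List Int
  | [] => ([], [])
  | [x] => ([x], [])
  | x :: y :: rest => ((x :: (splitEO rest).1), (y :: (splitEO rest).2))

lemma pySetD_neg (xs : List Int) (k : Nat) (v : Int) (hk : 0 < k) (h : k ≤ xs.length) :
    PySem.List.pySetD xs (-(k : Int)) v = xs.set (xs.length - k) v := by
  simp only [PySem.List.pySetD, PySem.List.pySet?, PySem.List.pyIdx?]
  have h2 : -(xs.length : Int) ≤ -(k : Int) := by omega
  rw [if_neg (by omega), if_pos h2]
  simp

lemma set_mid_front (front mid back : List Int) (v : Int) (h : mid ≠ []) :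
    (front ++ mid ++ back).set front.length v = front ++ mid.set 0 v ++ back := by
  rw [List.append_assoc, List.set_append, if_neg (by omega)]
  have : (mid ++ back).set (front.length - front.length) v = mid.set 0 v ++ back := by
    rw [Nat.sub_self, List.set_append, if_pos (by cases mid <;> simp_all)]
  rw [this, List.append_assoc]

lemma set_append_right' (l1 l2 : List Int) (n : Nat) (v : Int) :
    (l1 ++ l2).set (l1.length + n) v = l1 ++ l2.set n v := by
  rw [List.set_append, if_neg (by omega)]
  have hn : l1.length + n - l1.length = n := by omega
  rw [hn]

lemma altLoop (xs : List Int) : ∀ (f b : List Int),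
    xs.foldl stepB (f, b, true)
      = (f ++ (splitEO xs).1, b ++ (splitEO xs).2, decide (xs.length % 2 = 0)) := by
  induction xs using splitEO.induct with
  | case1 => simp [splitEO]
  | case2 x => intro f b; simp [splitEO, stepB]
  | case3 x y rest ih =>
      intro f b
      have : stepB (stepB (f, b, true) x) y = (f ++ [x], b ++ [y], true) := by
        simp [stepB]
      simp only [List.foldl_cons, this, ih]
      simp [splitEO]
      omega

lemma ALoop (xs : List Int) : ∀ (t : Nat) (front back : List Int),
    front.length = t + 1 → back.length = t →
    (PySem.List.enumerate xs (2 * (t : Int))).foldl stepA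
        (front ++ List.replicate xs.length 0 ++ back)
      = front ++ (splitEO xs).1 ++ (splitEO xs).2.reverse ++ back := by
  induction xs using splitEO.induct with
  | case1 => intro t front back hf hb; simp [splitEO, PySem.List.enumerate]
  | case2 x =>
      intro t front back hf hb
      have hmod : PySem.Int.mod (2 * (t : Int)) 2 = 0 := by
        rw [PySem.Int.mod_eq_emod_of_pos (by norm_num)]; omega
      have hdiv : PySem.Int.floordiv (2 * (t : Int)) 2 = (t : Int) := by
        rw [PySem.Int.floordiv_eq_ediv_of_pos (by norm_num)]; omega
      simp only [PySem.List.enumerate, List.foldl_cons, List.foldl_nil, stepA, hmod, hdiv]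
      rw [if_pos (by decide)]
      rw [PySem.List.pySetD_of_nonneg _ _ (by omega)]
      have htn : ((t : Int) + 1).toNat = front.length := by omega
      rw [htn, set_mid_front _ _ _ _ (by simp)]
      simp [splitEO]
  | case3 x y rest ih =>
      intro t front back hf hb
      rw [PySem.List.enumerate_cons, PySem.List.enumerate_cons]
      simp only [List.foldl_cons]
      -- first step: even index 2t
      have hmod : PySem.Int.mod (2 * (t : Int)) 2 = 0 := by
        rw [PySem.Int.mod_eq_emod_of_pos (by norm_num)]; omega
      have hdiv : PySem.Int.floordiv (2 * (t : Int)) 2 = (t : Int) := by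
        rw [PySem.Int.floordiv_eq_ediv_of_pos (by norm_num)]; omega
      have hstep1 : stepA (front ++ List.replicate (x :: y :: rest).length 0 ++ back) (2 * (t : Int), x)
          = front ++ (x :: List.replicate (rest.length + 1) 0) ++ back := by
        simp only [stepA, hmod, hdiv]
        rw [if_pos (by decide)]
        rw [PySem.List.pySetD_of_nonneg _ _ (by omega)]
        have htn : ((t : Int) + 1).toNat = front.length := by omega
        rw [htn, set_mid_front _ _ _ _ (by simp)]
        simp [List.replicate_succ]
      rw [hstep1]
      -- second step: odd index 2t+1, negative placement -(t+1)
      have hdiv2 : PySem.Int.floordiv (-(2 * (t : Int) + 1)) 2 = -((t : Int) + 1) := by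
        exact (PySem.Int.floordiv_eq_iff_of_pos (by norm_num)).mpr ⟨by omega, by omega⟩
      have hstep2 : stepA (front ++ (x :: List.replicate (rest.length + 1) 0) ++ back) (2 * (t : Int) + 1, y)
          = (front ++ [x]) ++ List.replicate rest.length 0 ++ (y :: back) := by
        simp only [stepA, hdiv2]
        rw [if_neg (by simp)]
        have hlen : (front ++ (x :: List.replicate (rest.length + 1) 0) ++ back).length
            = 2 * t + rest.length + 3 := by simp; omega
        have : -((t : Int) + 1) = -(((t + 1 : Nat) : Int)) := by push_cast; ring
        rw [this, pySetD_neg _ _ _ (by omega) (by omega), hlen]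
        have hidx : 2 * t + rest.length + 3 - (t + 1) = front.length + (1 + rest.length) := by omega
        rw [hidx]
        have e1 : front ++ (x :: List.replicate (rest.length + 1) 0) ++ back
            = front ++ ((x :: List.replicate rest.length 0) ++ ((0 : Int) :: back)) := by
          simp [List.replicate_succ']
        have e2 : 1 + rest.length = (x :: List.replicate rest.length 0).length + 0 := by simp; omega
        rw [e1, e2, set_append_right', set_append_right']
        simp
      rw [hstep2]
      have hcast : 2 * (t : Int) + 1 + 1 = 2 * ((t + 1 : Nat) : Int) := by push_cast; ring
      rw [hcast, ih (t + 1) (front ++ [x]) (y :: back) (by simp; omega) (by simp; omega)]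
      simp [splitEO]

-- ===== VERDICT (by name: the statement is the Claim_ definition above) =====
theorem construct_dial_spec : Claim_equal_construct_dial := by
  intro numbers _
  unfold Spec_construct_dial
  have hinit : PySem.List.pySetD (List.replicate (numbers.length + 1) (0 : Int)) 0 1
      = [1] ++ List.replicate numbers.length 0 ++ ([] : List Int) := by
    rw [PySem.List.pySetD_of_nonneg _ _ (by norm_num)]
    simp [List.replicate_succ]
  have key : construct_dial numbers
      = List.foldl stepA (PySem.List.pySetD (List.replicate (numbers.length + 1) 0) 0 1)
          (PySem.List.enumerate numbers 0) := rfl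
  have key2 : construct_dial_alt numbers
      = (List.foldl stepB ([1], ([], true)) numbers).1
          ++ (List.foldl stepB ([1], ([], true)) numbers).2.1.reverse := rfl
  have hA := ALoop numbers 0 [1] [] (by simp) (by simp)
  simp only [Nat.cast_zero, mul_zero] at hA
  rw [key, key2, hinit, hA, altLoop numbers [1] []]
  simp
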